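-- pv_equiv track=rewrite | github.com/DrMatrix-dev/Drosophila_lifespan_survivalcurve | 3.0/3.0.0/core/data_processor.py | _calculate_group_info
-- ===== SOURCE A (Python) =====
-- def _calculate_group_info(group_names):
--     """计算分组信息"""
--     per_group_nums = []
--     per_group_names = []
--     k = 1
--
--     for j in range(1, len(group_names)):
--         if group_names[j] != 0:
--             per_group_names.append(group_names[j])
--             per_group_nums.append(k)
--             k = 1
--         else:
--             k += 1
--         if j == len(group_names) - 1:
--             per_group_nums.append(k)
--
--     per_group_nums = per_group_nums[1:]
--     return per_group_nums, per_group_names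
-- ===== SOURCE B (Python) =====
-- def _calculate_group_info(group_names):
--     n = len(group_names)
--     markers = [j for j in range(1, n) if group_names[j] != 0]
--     names = [group_names[j] for j in markers]
--     nums = [b - a for a, b in zip(markers, markers[1:])]
--     if markers:
--         nums.append(n - markers[-1])
--     return nums, names
-- ===== Notes on version B (the rewrite author's own statement) =====
-- stated objective: simpler
-- what changed: Replaces A's stateful running-counter loop with its in-loop last-iteration append and final first-element strip by computing the nonzero marker positions once and returning their consecutive differences plus the final gap to the end of the list.
import Mathlib
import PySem

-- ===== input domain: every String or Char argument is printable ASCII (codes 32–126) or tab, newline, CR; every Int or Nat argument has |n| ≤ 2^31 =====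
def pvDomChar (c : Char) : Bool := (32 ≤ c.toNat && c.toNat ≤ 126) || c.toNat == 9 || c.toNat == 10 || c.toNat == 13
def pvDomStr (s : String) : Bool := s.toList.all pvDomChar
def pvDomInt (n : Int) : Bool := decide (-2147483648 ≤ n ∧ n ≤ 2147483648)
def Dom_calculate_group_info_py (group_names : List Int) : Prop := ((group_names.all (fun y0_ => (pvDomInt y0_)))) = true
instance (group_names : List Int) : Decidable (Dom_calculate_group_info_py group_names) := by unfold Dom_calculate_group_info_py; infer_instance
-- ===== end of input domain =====

-- B replaces A's running counter with marker positions and their consecutive differences (simpler decomposition; same value everywhere).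

-- ===== PORT A =====
def calculate_group_info_py (group_names : List Int) : List Int × List Int :=
  let n : Int := PySem.List.len group_names
  let s := (PySem.List.pyRange 1 n 1).foldl
    (fun (s : List Int × List Int × Int) j =>
      let s' :=
        if PySem.List.pyGetD group_names j 0 ≠ 0 then
          (s.1 ++ [s.2.2], s.2.1 ++ [PySem.List.pyGetD group_names j 0], (1 : Int))
        else
          (s.1, s.2.1, s.2.2 + 1)
      if j = n - 1 then (s'.1 ++ [s'.2.2], s'.2.1, s'.2.2) else s')
    ([], [], 1)
  (PySem.List.slice s.1 (some 1) none, s.2.1)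

-- ===== PORT B =====
def calculate_group_info_py_alt (group_names : List Int) : List Int × List Int :=
  let n : Int := PySem.List.len group_names
  let markers := (PySem.List.pyRange 1 n 1).filter
    (fun j => PySem.List.pyGetD group_names j 0 != 0)
  let names := markers.map (fun j => PySem.List.pyGetD group_names j 0)
  let nums := (List.zip markers (PySem.List.slice markers (some 1) none)).map (fun p => p.2 - p.1)
  let nums := if markers = [] then nums else nums ++ [n - PySem.List.pyGetD markers (-1) 0]
  (nums, names)

-- ===== PRECONDITION & SPEC =====
def Spec_calculate_group_info_py (group_names : List Int) (out : List Int × List Int) : Prop := out = calculate_group_info_py_alt group_names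
instance (group_names : List Int) (out : List Int × List Int) : Decidable (Spec_calculate_group_info_py group_names out) := by unfold Spec_calculate_group_info_py; infer_instance

-- ===== CLAIM (what is proved, stated in full; the proofs are below) =====
def Claim_equal_calculate_group_info_py : Prop := ∀ (group_names : List Int), Dom_calculate_group_info_py group_names → Spec_calculate_group_info_py group_names (calculate_group_info_py group_names)

-- ===== LEMMAS AND PROOFS =====

-- A's inner loop body (without the last-iteration append), as a pure step function.
def pvStep (s : List Int × List Int × Int) (x : Int) : List Int × List Int × Int :=
  if x ≠ 0 then (s.1 ++ [s.2.2], s.2.1 ++ [x], 1) else (s.1, s.2.1, s.2.2 + 1)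

-- positions (offset i) of the nonzero entries of a list
def pvPosns : List Int → Int → List Int
  | [], _ => []
  | x :: t, i => if x ≠ 0 then i :: pvPosns t (i + 1) else pvPosns t (i + 1)

-- consecutive differences
def pvDseq (s : List Int) : List Int := (List.zip s s.tail).map (fun p => p.2 - p.1)

theorem pvDseq_cons_cons (a b : Int) (s : List Int) :
    pvDseq (a :: b :: s) = (b - a) :: pvDseq (b :: s) := by
  simp [pvDseq]

theorem pvDseq_concat (s : List Int) (b : Int) (h : s ≠ []) :
    pvDseq (s ++ [b]) = pvDseq s ++ [b - s.getLastD 0] := by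
  induction s with
  | nil => simp at h
  | cons a s ih =>
    cases s with
    | nil => simp [pvDseq]
    | cons c s =>
      have := ih (by simp)
      simp only [List.cons_append, pvDseq_cons_cons] at *
      simp [this]

theorem pv_get_head (g t : List Int) (x : Int) (i : Int) (hi : 0 ≤ i)
    (h : g.drop i.toNat = x :: t) : PySem.List.pyGetD g i 0 = x := by
  have hlt : i.toNat < g.length := by
    have := congrArg List.length h; simp at this; omega
  rw [PySem.List.pyGetD_eq_getElem g 0 hi (by omega)]
  have h1 : (g.drop i.toNat)[0]? = some x := by rw [h]; rfl
  rw [List.getElem?_drop] at h1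
  simp only [Nat.add_zero] at h1
  simp [List.getElem?_eq_getElem hlt] at h1
  exact h1

theorem pv_drop_succ (g t : List Int) (x : Int) (i : Int) (hi : 0 ≤ i)
    (h : g.drop i.toNat = x :: t) : g.drop (i + 1).toNat = t := by
  have h2 : (i + 1).toNat = i.toNat + 1 := by omega
  have h3 := congrArg (List.drop 1) h
  simp only [List.drop_drop] at h3
  rw [h2]
  simpa using h3

-- the loop over indices [i, i + |t|) reading group_names[j] is the fold of pvStep over t
theorem pv_fold_range (g : List Int) :
    ∀ (t r : List Int) (i : Int) (s : List Int × List Int × Int), 0 ≤ i →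
      g.drop i.toNat = t ++ r →
      (PySem.List.pyRange i (i + t.length) 1).foldl
        (fun s j => pvStep s (PySem.List.pyGetD g j 0)) s = t.foldl pvStep s := by
  intro t
  induction t with
  | nil =>
    intro r i s hi h
    rw [show i + (([] : List Int).length : Int) = i by simp,
      PySem.List.pyRange_one_eq_nil le_rfl]
    simp
  | cons x t ih =>
    intro r i s hi h
    have hx : PySem.List.pyGetD g i 0 = x := pv_get_head g (t ++ r) x i hi h
    have hsplit : i + ((x :: t).length : Int) = (i + 1) + (t.length : Int) := by
      simp only [List.length_cons]; push_cast; ring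
    rw [hsplit, PySem.List.pyRange_one_cons (by omega)]
    simp only [List.foldl_cons, hx]
    exact ih r (i + 1) _ (by omega) (pv_drop_succ g (t ++ r) x i hi h)

-- the marker positions computed by B are pvPosns of the suffix
theorem pv_markers (g : List Int) :
    ∀ (t : List Int) (i : Int), 0 ≤ i → g.drop i.toNat = t →
      (PySem.List.pyRange i (PySem.List.len g) 1).filter
        (fun j => PySem.List.pyGetD g j 0 != 0) = pvPosns t i := by
  intro t
  induction t with
  | nil =>
    intro i hi h
    have hlen : g.length ≤ i.toNat := by
      have := congrArg List.length h; simp at this; omega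
    rw [PySem.List.pyRange_one_eq_nil (by simp; omega)]
    simp [pvPosns]
  | cons x t ih =>
    intro i hi h
    have hlt : i.toNat < g.length := by
      have := congrArg List.length h; simp at this; omega
    have hx : PySem.List.pyGetD g i 0 = x := pv_get_head g t x i hi h
    rw [PySem.List.pyRange_one_cons (by simp; omega)]
    rw [List.filter_cons]
    have hrec := ih (i + 1) (by omega) (pv_drop_succ g t x i hi h)
    rw [PySem.List.len_eq] at hrec
    by_cases hx0 : x = 0
    · simp [hx, hx0, pvPosns, hrec]
    · simp [hx, hx0, pvPosns, hrec]

-- reading g back at the marker positions yields the nonzero entries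
theorem pv_names (g : List Int) :
    ∀ (t : List Int) (i : Int), 0 ≤ i → g.drop i.toNat = t →
      (pvPosns t i).map (fun j => PySem.List.pyGetD g j 0) = t.filter (fun x => x != 0) := by
  intro t
  induction t with
  | nil => intro i _ _; simp [pvPosns]
  | cons x t ih =>
    intro i hi h
    have hx : PySem.List.pyGetD g i 0 = x := pv_get_head g t x i hi h
    have hrec := ih (i + 1) (by omega) (pv_drop_succ g t x i hi h)
    by_cases hx0 : x = 0
    · simp [pvPosns, hx0, hrec]
    · simp [pvPosns, hx0, hx, hrec]

-- full characterisation of A's accumulator after folding pvStep over t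
theorem pv_fold_char :
    ∀ (t : List Int) (i k : Int) (ns ms : List Int),
      t.foldl pvStep (ns, ms, k) =
        (ns ++ pvDseq ((i - k) :: pvPosns t i),
         ms ++ t.filter (fun x => x != 0),
         i + (t.length : Int) - (pvPosns t i).getLastD (i - k)) := by
  intro t
  induction t with
  | nil =>
    intro i k ns ms
    simp [pvDseq, pvPosns]
  | cons x t ih =>
    intro i k ns ms
    by_cases hx0 : x = 0
    · subst hx0
      have hstep : pvStep (ns, ms, k) 0 = (ns, ms, k + 1) := by simp [pvStep]
      rw [List.foldl_cons, hstep, ih (i + 1) (k + 1) ns ms]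
      have he : i + 1 - (k + 1) = i - k := by ring
      have hl : i + 1 + (t.length : Int) = i + (((0 : Int) :: t).length : Int) := by
        simp only [List.length_cons]; push_cast; ring
      rw [he, hl]
      simp [pvPosns]
    · have hstep : pvStep (ns, ms, k) x = (ns ++ [k], ms ++ [x], 1) := by simp [pvStep, hx0]
      rw [List.foldl_cons, hstep, ih (i + 1) 1 (ns ++ [k]) (ms ++ [x])]
      have he : i + 1 - 1 = i := by ring
      have hl : i + 1 + (t.length : Int) = i + ((x :: t).length : Int) := by
        simp only [List.length_cons]; push_cast; ring
      rw [he, hl]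
      simp only [pvPosns, if_pos hx0, Prod.mk.injEq]
      refine ⟨?_, ?_, ?_⟩
      · rw [pvDseq_cons_cons, List.append_assoc]
        norm_num
      · simp [hx0]
      · rcases hP : pvPosns t (i + 1) with _ | ⟨a, l⟩ <;> simp [List.getLast?_cons]

theorem pvPosns_concat (e : Int) :
    ∀ (mid : List Int) (i : Int),
      pvPosns (mid ++ [e]) i =
        pvPosns mid i ++ (if e ≠ 0 then [i + (mid.length : Int)] else []) := by
  intro mid
  induction mid with
  | nil => intro i; by_cases h : e = 0 <;> simp [pvPosns, h]
  | cons x t ih =>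
    intro i
    have hl : i + 1 + (t.length : Int) = i + ((x :: t).length : Int) := by
      simp only [List.length_cons]; push_cast; ring
    by_cases hx : x = 0
    · subst hx
      simp only [List.cons_append, pvPosns]
      rw [ih (i + 1), hl]
      simp
    · simp only [List.cons_append, pvPosns, if_pos hx]
      rw [ih (i + 1), hl]

theorem pvDseq_eq_zip_slice (M : List Int) :
    (M.zip (PySem.List.slice M (some 1) none)).map (fun p => p.2 - p.1) = pvDseq M := by
  rw [PySem.List.slice_from_one]
  rfl

-- A's loop body, named, for reasoning (pvA_eq below shows the port is this fold)
def pvBodyA (g : List Int) (n : Int) (s : List Int × List Int × Int) (j : Int) :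
    List Int × List Int × Int :=
  let s' :=
    if PySem.List.pyGetD g j 0 ≠ 0 then
      (s.1 ++ [s.2.2], s.2.1 ++ [PySem.List.pyGetD g j 0], (1 : Int))
    else
      (s.1, s.2.1, s.2.2 + 1)
  if j = n - 1 then (s'.1 ++ [s'.2.2], s'.2.1, s'.2.2) else s'

theorem pvA_eq (g : List Int) : calculate_group_info_py g =
    (PySem.List.slice ((PySem.List.pyRange 1 (PySem.List.len g) 1).foldl
        (pvBodyA g (PySem.List.len g)) ([], [], 1)).1 (some 1) none,
     ((PySem.List.pyRange 1 (PySem.List.len g) 1).foldl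
        (pvBodyA g (PySem.List.len g)) ([], [], 1)).2.1) := rfl

theorem pv_main (g : List Int) : calculate_group_info_py g = calculate_group_info_py_alt g := by
  cases g with
  | nil => rfl
  | cons x t =>
    rcases eq_or_ne t [] with rfl | ht
    · rfl
    · obtain ⟨mid, e, rfl⟩ : ∃ mid e, t = mid ++ [e] :=
        ⟨t.dropLast, t.getLast ht, (List.dropLast_append_getLast ht).symm⟩
      set g : List Int := x :: (mid ++ [e]) with hg
      set L : Int := (mid.length : Int) with hL
      have hL0 : 0 ≤ L := by positivity
      have hng : PySem.List.len g = L + 2 := by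
        simp [hg, PySem.List.len_eq, hL]; ring
      have hdrop1 : g.drop (1 : Int).toNat = mid ++ [e] := by simp [hg]
      have hdrop2 : g.drop (L + 1).toNat = [e] := by
        have h1 : (L + 1).toNat = mid.length + 1 := by omega
        rw [h1, hg]
        simp [List.drop_succ_cons]
      have hgete : PySem.List.pyGetD g (L + 1) 0 = e :=
        pv_get_head g [] e (L + 1) (by omega) hdrop2
      -- ===== A side =====
      rw [pvA_eq, hng]
      rw [PySem.List.pyRange_one_append 1 (L + 1) (L + 2) (by omega) (by omega)]
      have hsing : PySem.List.pyRange (L + 1) (L + 2) 1 = [L + 1] := by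
        rw [show L + 2 = (L + 1) + 1 by ring]
        exact PySem.List.pyRange_one_singleton (L + 1)
      rw [hsing, List.foldl_append]
      have hcongr : (PySem.List.pyRange 1 (L + 1) 1).foldl (pvBodyA g (L + 2)) ([], [], 1)
          = (PySem.List.pyRange 1 (L + 1) 1).foldl
              (fun s j => pvStep s (PySem.List.pyGetD g j 0)) ([], [], 1) := by
        refine PySem.List.foldl_congr_mem _ _ _ _ ?_
        intro acc j hj
        have hj' := (PySem.List.mem_pyRange_one).1 hj
        simp only [pvBodyA, pvStep]
        rw [if_neg (by omega)]
      rw [hcongr]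
      rw [show L + 1 = 1 + (mid.length : Int) from by rw [hL]; ring] at *
      rw [pv_fold_range g mid [e] 1 ([], [], 1) (by omega) hdrop1]
      rw [pv_fold_char mid 1 1 [] []]
      -- the last iteration j = n - 1
      simp only [List.foldl_cons, List.foldl_nil, pvBodyA]
      rw [if_pos (by ring)]
      rw [hgete]
      -- ===== B side =====
      simp only [calculate_group_info_py_alt]
      rw [pv_markers g (mid ++ [e]) 1 (by omega) hdrop1,
        pv_names g (mid ++ [e]) 1 (by omega) hdrop1]
      rw [hng, pvPosns_concat e mid 1]
      -- ===== compare =====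
      have hlastD : ∀ (a : Int) (l : List Int), (a :: l).getLastD 0 = (a :: l).getLast (by simp) := by
        intro a l
        rw [List.getLastD_eq_getLast?, List.getLast?_eq_some_getLast (by simp)]
        rfl
      by_cases he0 : e = 0
      · subst he0
        rw [if_neg (by simp)]
        by_cases hP : pvPosns mid 1 = []
        · simp [hP, pvDseq, PySem.List.slice_from_one]
        · obtain ⟨a, l, hQ⟩ : ∃ a l, pvPosns mid 1 = a :: l := by
            rcases hQ : pvPosns mid 1 with _ | ⟨a, l⟩
            · exact absurd hQ hP
            · exact ⟨a, l, rfl⟩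
          rw [hQ, if_neg (by simp)]
          rw [PySem.List.pyGetD_neg_one _ 0 (by simp)]
          rw [pvDseq_eq_zip_slice]
          simp only [show (1 : Int) - 1 = 0 from rfl, pvDseq_cons_cons,
            PySem.List.slice_from_one, Prod.mk.injEq]
          rw [hlastD a l]
          refine ⟨?_, by simp⟩
          simp [hL, sub_zero]
          ring
      · rw [if_pos he0, if_pos he0]
        rw [if_neg (by simp)]
        rw [PySem.List.pyGetD_neg_one_append_singleton]
        rw [pvDseq_eq_zip_slice]
        by_cases hP : pvPosns mid 1 = []
        · rw [hP]
          simp only [List.nil_append, show (1 : Int) - 1 = 0 from rfl]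
          simp [pvDseq, PySem.List.slice_from_one]
          exact ⟨by omega, by simp [he0]⟩
        · obtain ⟨a, l, hQ⟩ : ∃ a l, pvPosns mid 1 = a :: l := by
            rcases hQ : pvPosns mid 1 with _ | ⟨a, l⟩
            · exact absurd hQ hP
            · exact ⟨a, l, rfl⟩
          rw [hQ]
          rw [pvDseq_concat (a :: l) (1 + (mid.length : Int)) (by simp)]
          simp only [show (1 : Int) - 1 = 0 from rfl, pvDseq_cons_cons,
            PySem.List.slice_from_one, Prod.mk.injEq]
          rw [hlastD a l]
          refine ⟨?_, by simp [he0]⟩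
          simp [hL, sub_zero]
          ring


-- ===== VERDICT (by name: the statement is the Claim_ definition above) =====
theorem calculate_group_info_py_spec : Claim_equal_calculate_group_info_py := by
  intro g _
  unfold Spec_calculate_group_info_py
  exact pv_main g
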